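-- pv_equiv track=rewrite | github.com/mr-pyle/Tron-2026 | R-evo2.py | get_reachable_space
-- ===== SOURCE A (Python) =====
-- import collections
--
-- def get_reachable_space(start, board, dim):
--     """Simple Flood Fill to see how many tiles are in this pocket."""
--     q = collections.deque([start])
--     visited = {start}
--     count = 0
--     while q and count < 200: # Cap search for performance
--         curr = q.popleft()
--         count += 1
--         for dx, dy in ((0,1),(0,-1),(1,0),(-1,0)):
--             n = (curr[0]+dx, curr[1]+dy)
--             if 0 <= n[0] < dim and 0 <= n[1] < dim and n not in board and n not in visited:
--                 visited.add(n)
--                 q.append(n)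
--     return count
-- ===== SOURCE B (Python) =====
-- def get_reachable_space(start, board, dim):
--     """Recursive depth-first flood fill counting tiles in this pocket, capped at 200."""
--     visited = {start}
--
--     def dfs(cell, count):
--         count += 1
--         for dx, dy in ((0, 1), (0, -1), (1, 0), (-1, 0)):
--             n = (cell[0] + dx, cell[1] + dy)
--             if (0 <= n[0] < dim and 0 <= n[1] < dim
--                     and n not in board and n not in visited and count < 200):
--                 visited.add(n)
--                 count = dfs(n, count)
--         return count
--
--     return dfs(start, 0)
-- ===== Notes on version B (the rewrite author's own statement) =====
-- stated objective: alternative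
-- what changed: Replaces A's iterative breadth-first flood fill (deque worklist, count of popped tiles) by a recursive depth-first flood fill: a nested dfs helper counts the current tile and recurses into each unvisited in-bounds neighbour not on the board, threading the count and stopping at the 200 cap.
import Mathlib
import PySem

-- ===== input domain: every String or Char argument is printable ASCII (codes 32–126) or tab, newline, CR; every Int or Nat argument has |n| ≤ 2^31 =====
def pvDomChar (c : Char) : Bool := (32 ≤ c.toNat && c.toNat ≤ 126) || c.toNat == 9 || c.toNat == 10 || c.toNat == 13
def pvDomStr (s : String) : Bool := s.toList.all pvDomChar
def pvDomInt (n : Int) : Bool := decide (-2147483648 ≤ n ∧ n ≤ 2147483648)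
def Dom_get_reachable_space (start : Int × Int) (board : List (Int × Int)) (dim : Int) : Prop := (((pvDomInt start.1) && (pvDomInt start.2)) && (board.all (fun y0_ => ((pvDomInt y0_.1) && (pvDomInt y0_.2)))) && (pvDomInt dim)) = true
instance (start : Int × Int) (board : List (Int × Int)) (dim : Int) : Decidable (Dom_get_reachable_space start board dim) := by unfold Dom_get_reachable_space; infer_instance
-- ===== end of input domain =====

set_option maxRecDepth 8000


-- B replaces A's queue-based breadth-first flood fill by a recursive depth-first flood fill
-- with a shared visited set and a threaded count, capped at 200 exactly as A; same return value.

-- the four directions, shared literal of both programs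
def pvDirs : List (Int × Int) := [(0,1),(0,-1),(1,0),(-1,0)]

-- '0 <= n[0] < dim and 0 <= n[1] < dim and n not in board'
def pvOk (board : List (Int × Int)) (dim : Int) (n : Int × Int) : Bool :=
  decide (0 ≤ n.1) && decide (n.1 < dim) && decide (0 ≤ n.2) && decide (n.2 < dim) && !(board.contains n)

-- body of A's inner 'for dx, dy in ...' loop (one direction)
def pvBfsStep (board : List (Int × Int)) (dim : Int) (curr : Int × Int)
    (st : PySem.Set (Int × Int) × List (Int × Int)) (d : Int × Int) :
    PySem.Set (Int × Int) × List (Int × Int) :=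
  let n := (curr.1 + d.1, curr.2 + d.2)
  if pvOk board dim n && !(PySem.Set.contains st.1 n) then
    (PySem.Set.add st.1 n, st.2 ++ [n])
  else st

-- ===== PORT A =====
-- the 'while q and count < 200' loop; fuel only makes the recursion structural:
-- the entry call passes fuel = 200 and the loop body runs only while count < 200.
def pvBfsLoop (board : List (Int × Int)) (dim : Int) :
    Nat → List (Int × Int) → PySem.Set (Int × Int) → Int → Int
  | _, [], _, count => count
  | 0, _ :: _, _, count => count
  | fuel+1, curr :: rest, visited, count =>
    if count < 200 then
      let count := count + 1
      let st := pvDirs.foldl (pvBfsStep board dim curr) (visited, rest)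
      pvBfsLoop board dim fuel st.2 st.1 count
    else count

def get_reachable_space (start : Int × Int) (board : List (Int × Int)) (dim : Int) : Int :=
  pvBfsLoop board dim 200 [start] (PySem.Set.ofList [start]) 0

-- ===== PORT B =====
-- the recursive 'dfs(cell, count)' of Source B: visited is threaded instead of shared;
-- fuel = 200 at the entry call only makes the recursion structural (count < 200 guards every call).
def pvDfs (board : List (Int × Int)) (dim : Int) :
    Nat → (Int × Int) → PySem.Set (Int × Int) → Int → PySem.Set (Int × Int) × Int
  | 0, _, visited, count => (visited, count)
  | fuel+1, cell, visited, count =>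
    let count := count + 1
    pvDirs.foldl (fun (st : PySem.Set (Int × Int) × Int) d =>
        let n := (cell.1 + d.1, cell.2 + d.2)
        if pvOk board dim n && !(PySem.Set.contains st.1 n) && decide (st.2 < 200) then
          pvDfs board dim fuel n (PySem.Set.add st.1 n) st.2
        else st) (visited, count)

def get_reachable_space_alt (start : Int × Int) (board : List (Int × Int)) (dim : Int) : Int :=
  (pvDfs board dim 200 start (PySem.Set.ofList [start]) 0).2

-- ===== PRECONDITION & SPEC =====
def Spec_get_reachable_space (start : Int × Int) (board : List (Int × Int)) (dim : Int) (out : Int) : Prop := out = get_reachable_space_alt start board dim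
instance (start : Int × Int) (board : List (Int × Int)) (dim : Int) (out : Int) : Decidable (Spec_get_reachable_space start board dim out) := by unfold Spec_get_reachable_space; infer_instance

-- ===== CLAIM (what is proved, stated in full; the proofs are below) =====
def Claim_equal_get_reachable_space : Prop := ∀ (start : Int × Int) (board : List (Int × Int)) (dim : Int), Dom_get_reachable_space start board dim → Spec_get_reachable_space start board dim (get_reachable_space start board dim)

-- ===== LEMMAS AND PROOFS =====

-- valid neighbours of a cell, as a Finset
def pvNbrs (board : List (Int × Int)) (dim : Int) (c : Int × Int) : Finset (Int × Int) :=
  ((pvDirs.map (fun d => (c.1 + d.1, c.2 + d.2))).filter (fun n => pvOk board dim n)).toFinset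

-- one saturation step
def pvStep (board : List (Int × Int)) (dim : Int) (S : Finset (Int × Int)) : Finset (Int × Int) :=
  S ∪ S.biUnion (pvNbrs board dim)

-- k saturation steps from {start}
def pvReach (board : List (Int × Int)) (dim : Int) (start : Int × Int) (k : Nat) : Finset (Int × Int) :=
  (pvStep board dim)^[k] {start}

theorem pvStep_subset (board : List (Int × Int)) (dim : Int) (S : Finset (Int × Int)) :
    S ⊆ pvStep board dim S := Finset.subset_union_left

theorem pvReach_succ (board : List (Int × Int)) (dim : Int) (start : Int × Int) (k : Nat) :
    pvReach board dim start (k+1) = pvStep board dim (pvReach board dim start k) :=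
  Function.iterate_succ_apply' _ _ _

theorem pvReach_mono (board : List (Int × Int)) (dim : Int) (start : Int × Int)
    {k m : Nat} (h : k ≤ m) : pvReach board dim start k ⊆ pvReach board dim start m := by
  induction m, h using Nat.le_induction with
  | base => exact Finset.Subset.refl _
  | succ m hm ih =>
    exact ih.trans (by rw [pvReach_succ]; exact pvStep_subset board dim _)

theorem pvNbrs_subset_step (board : List (Int × Int)) (dim : Int) {S : Finset (Int × Int)}
    {c : Int × Int} (hc : c ∈ S) : pvNbrs board dim c ⊆ pvStep board dim S := by
  intro y hy
  exact Finset.mem_union_right _ (Finset.mem_biUnion.2 ⟨c, hc, hy⟩)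

theorem pvReach_subset_closed (board : List (Int × Int)) (dim : Int) (start : Int × Int)
    {V : Finset (Int × Int)} (hs : start ∈ V)
    (hcl : ∀ x ∈ V, pvNbrs board dim x ⊆ V) (k : Nat) :
    pvReach board dim start k ⊆ V := by
  induction k with
  | zero => simpa [pvReach] using hs
  | succ k ih =>
    rw [pvReach_succ]
    refine Finset.union_subset ih (Finset.biUnion_subset.2 ?_)
    exact fun x hx => hcl x (ih hx)

theorem mem_pvNbrs (board : List (Int × Int)) (dim : Int) (c y : Int × Int) :
    y ∈ pvNbrs board dim c ↔
      (∃ d ∈ pvDirs, y = (c.1 + d.1, c.2 + d.2)) ∧ pvOk board dim y = true := by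
  simp only [pvNbrs, List.mem_toFinset, List.mem_filter, List.mem_map]
  constructor <;> rintro ⟨⟨d, hd, hy⟩, hok⟩
  · exact ⟨⟨d, hd, hy.symm⟩, hok⟩
  · exact ⟨⟨d, hd, hy.symm⟩, hok⟩

theorem pvNotContains {s : PySem.Set (Int × Int)} {x : Int × Int} :
    (!(PySem.Set.contains s x)) = true ↔ x ∉ s := by
  constructor
  · intro h hx
    rw [(PySem.Set.contains_iff s x).2 hx] at h
    simp at h
  · intro hx
    cases h : PySem.Set.contains s x
    · rfl
    · exact absurd ((PySem.Set.contains_iff s x).1 h) hx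

theorem pvBfsFold (board : List (Int × Int)) (dim : Int) (curr : Int × Int) :
    ∀ (l : List (Int × Int)) (v : PySem.Set (Int × Int)) (q : List (Int × Int)), v.Nodup →
    ∃ new : List (Int × Int),
      l.foldl (pvBfsStep board dim curr) (v, q) = (v ++ new, q ++ new) ∧
      (v ++ new).Nodup ∧
      (∀ x ∈ new, x ∉ v) ∧
      (∀ x ∈ new, ∃ d ∈ l, x = (curr.1 + d.1, curr.2 + d.2) ∧ pvOk board dim x = true) ∧
      (∀ d ∈ l, pvOk board dim (curr.1 + d.1, curr.2 + d.2) = true →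
        (curr.1 + d.1, curr.2 + d.2) ∈ v ++ new) := by
  intro l
  induction l with
  | nil => exact fun v q hnd => ⟨[], by simp, by simpa using hnd, by simp, by simp, by simp⟩
  | cons d l ih =>
    intro v q hnd
    by_cases hcond : (pvOk board dim (curr.1 + d.1, curr.2 + d.2) &&
        !(PySem.Set.contains v (curr.1 + d.1, curr.2 + d.2))) = true
    · obtain ⟨hok, hnm⟩ := Bool.and_eq_true_iff.1 hcond
      have hnmem : (curr.1 + d.1, curr.2 + d.2) ∉ v := pvNotContains.1 hnm
      have hstep : pvBfsStep board dim curr (v, q) d =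
          (v ++ [(curr.1 + d.1, curr.2 + d.2)], q ++ [(curr.1 + d.1, curr.2 + d.2)]) := by
        simp [pvBfsStep, PySem.Set.add_of_not_mem hnmem]
        exact ⟨hok, hnmem⟩
      have hnd' : (v ++ [(curr.1 + d.1, curr.2 + d.2)]).Nodup := by
        simp [List.nodup_append, hnd]
        intro a b hab h1 h2
        subst h1; subst h2; exact hnmem hab
      obtain ⟨new', heq, hnodup', hfresh', hdirs', hcov'⟩ :=
        ih (v ++ [(curr.1 + d.1, curr.2 + d.2)]) (q ++ [(curr.1 + d.1, curr.2 + d.2)]) hnd'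
      refine ⟨(curr.1 + d.1, curr.2 + d.2) :: new', ?_, ?_, ?_, ?_, ?_⟩
      · simpa [hstep, List.append_assoc] using heq
      · simpa [List.append_assoc] using hnodup'
      · intro x hx
        rcases List.mem_cons.1 hx with rfl | hx
        · exact hnmem
        · intro hxv; exact hfresh' x hx (List.mem_append_left _ hxv)
      · intro x hx
        rcases List.mem_cons.1 hx with rfl | hx
        · exact ⟨d, List.mem_cons_self, rfl, hok⟩
        · obtain ⟨d', hd', hx', hok'⟩ := hdirs' x hx
          exact ⟨d', List.mem_cons_of_mem _ hd', hx', hok'⟩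
      · intro d0 hd0 hok0
        rcases List.mem_cons.1 hd0 with rfl | hd0
        · simp
        · simpa [List.append_assoc] using hcov' d0 hd0 hok0
    · have hstep : pvBfsStep board dim curr (v, q) d = (v, q) := by
        simp only [pvBfsStep]
        rw [if_neg (by simpa using hcond)]
      obtain ⟨new', heq, hnodup', hfresh', hdirs', hcov'⟩ := ih v q hnd
      refine ⟨new', by simpa [hstep] using heq, hnodup', hfresh', ?_, ?_⟩
      · intro x hx
        obtain ⟨d', hd', hx', hok'⟩ := hdirs' x hx
        exact ⟨d', List.mem_cons_of_mem _ hd', hx', hok'⟩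
      · intro d0 hd0 hok0
        rcases List.mem_cons.1 hd0 with rfl | hd0
        · -- branch not taken but the neighbour is valid: it was already in v
          have : PySem.Set.contains v (curr.1 + d0.1, curr.2 + d0.2) = true := by
            by_contra hc
            exact hcond (by simp [hok0] at hc ⊢; simp [hc])
          exact List.mem_append_left _ ((PySem.Set.contains_iff _ _).1 this)
        · exact hcov' d0 hd0 hok0

theorem pvExit_closed (board : List (Int × Int)) (dim : Int) (start : Int × Int)
    (v : PySem.Set (Int × Int)) (c : Int) (hvn : v.Nodup) (hlen : c = (v.length : Int))
    (_hc0 : 0 ≤ c) (hc2 : c ≤ 200)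
    (hreach : ∀ x ∈ v, x ∈ pvReach board dim start c.toNat) (hstart : start ∈ v)
    (hclosed : ∀ x ∈ v, ∀ y ∈ pvNbrs board dim x, y ∈ v) :
    c = ((min 200 (pvReach board dim start 200).card : Nat) : Int) := by
  have hsub : v.toFinset ⊆ pvReach board dim start 200 := by
    intro y hy
    exact pvReach_mono board dim start (by omega) (hreach y (List.mem_toFinset.1 hy))
  have hsup : pvReach board dim start 200 ⊆ v.toFinset :=
    pvReach_subset_closed board dim start (List.mem_toFinset.2 hstart)
      (fun x hx y hy => List.mem_toFinset.2 (hclosed x (List.mem_toFinset.1 hx) y hy)) 200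
  have hcard : (pvReach board dim start 200).card = v.length := by
    rw [← Finset.Subset.antisymm hsub hsup]
    exact List.toFinset_card_of_nodup hvn
  omega

theorem pvExit_cap (board : List (Int × Int)) (dim : Int) (start : Int × Int)
    (v : PySem.Set (Int × Int)) (c : Int) (hvn : v.Nodup) (hle : c ≤ (v.length : Int))
    (hc2 : c ≤ 200) (h200 : 200 ≤ c)
    (hreach : ∀ x ∈ v, x ∈ pvReach board dim start c.toNat) :
    c = ((min 200 (pvReach board dim start 200).card : Nat) : Int) := by
  have hsub : v.toFinset ⊆ pvReach board dim start 200 := by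
    intro y hy
    exact pvReach_mono board dim start (by omega) (hreach y (List.mem_toFinset.1 hy))
  have hcardle : v.length ≤ (pvReach board dim start 200).card := by
    rw [← List.toFinset_card_of_nodup hvn]
    exact Finset.card_le_card hsub
  omega

theorem pvBfs_eq (board : List (Int × Int)) (dim : Int) (start : Int × Int) :
    ∀ (fuel : Nat) (q : List (Int × Int)) (v : PySem.Set (Int × Int)) (c : Int),
    v.Nodup → q.Nodup → (∀ x ∈ q, x ∈ v) →
    c + q.length = (v.length : Int) →
    0 ≤ c → c ≤ 200 → (200 : Int) ≤ c + fuel →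
    (∀ x ∈ v, x ∈ pvReach board dim start c.toNat) →
    start ∈ v →
    (∀ x ∈ v, x ∈ q ∨ ∀ y ∈ pvNbrs board dim x, y ∈ v) →
    pvBfsLoop board dim fuel q v c = ((min 200 (pvReach board dim start 200).card : Nat) : Int) := by
  intro fuel
  induction fuel with
  | zero =>
    intro q v c hvn hqn hqv hlen hc0 hc2 hfuel hreach hstart hclosed
    cases q with
    | nil =>
      show c = _
      refine pvExit_closed board dim start v c hvn (by simpa using hlen) hc0 hc2 hreach hstart ?_
      exact fun x hx => (hclosed x hx).resolve_left (by simp)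
    | cons curr rest =>
      show c = _
      refine pvExit_cap board dim start v c hvn (by simp at hlen; omega) hc2 (by simp at hfuel; omega) hreach
  | succ fuel ih =>
    intro q v c hvn hqn hqv hlen hc0 hc2 hfuel hreach hstart hclosed
    cases q with
    | nil =>
      show c = _
      refine pvExit_closed board dim start v c hvn (by simpa using hlen) hc0 hc2 hreach hstart ?_
      exact fun x hx => (hclosed x hx).resolve_left (by simp)
    | cons curr rest =>
      simp only [pvBfsLoop]
      by_cases hclt : c < 200
      · rw [if_pos hclt]
        obtain ⟨new, heq, hnodup, hfresh, hdirs, hcov⟩ := pvBfsFold board dim curr pvDirs v rest hvn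
        rw [heq]
        have htn : (c + 1).toNat = c.toNat + 1 := by omega
        refine ih (rest ++ new) (v ++ new) (c + 1) hnodup ?_ ?_ ?_ (by omega) (by omega)
          (by push_cast at hfuel ⊢; omega) ?_ (List.mem_append_left _ hstart) ?_
        · rw [List.nodup_append]
          refine ⟨hqn.of_cons, hnodup.of_append_right, ?_⟩
          intro a ha b hb hab
          exact hfresh b hb (hab ▸ hqv a (List.mem_cons_of_mem _ ha))
        · intro x hx
          rcases List.mem_append.1 hx with hx | hx
          · exact List.mem_append_left _ (hqv x (List.mem_cons_of_mem _ hx))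
          · exact List.mem_append_right _ hx
        · simp only [List.length_append, List.length_cons] at hlen ⊢
          push_cast at hlen ⊢
          omega
        · intro x hx
          rcases List.mem_append.1 hx with hx | hx
          · exact pvReach_mono board dim start (by omega) (hreach x hx)
          · obtain ⟨d, hd, hxe, hok⟩ := hdirs x hx
            have hxn : x ∈ pvNbrs board dim curr :=
              (mem_pvNbrs board dim curr x).2 ⟨⟨d, hd, hxe⟩, hok⟩
            have hcurr : curr ∈ pvReach board dim start c.toNat :=
              hreach curr (hqv curr List.mem_cons_self)
            have hxstep := pvNbrs_subset_step board dim hcurr hxn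
            rw [← pvReach_succ] at hxstep
            rwa [htn]
        · intro x hx
          rcases List.mem_append.1 hx with hxv | hxn
          · rcases hclosed x hxv with hq | hcl
            · rcases List.mem_cons.1 hq with rfl | hrest
              · right
                intro y hy
                obtain ⟨⟨d, hd, hye⟩, hok⟩ := (mem_pvNbrs board dim x y).1 hy
                subst hye
                exact hcov d hd hok
              · exact Or.inl (List.mem_append_left _ hrest)
            · right
              exact fun y hy => List.mem_append_left _ (hcl y hy)
          · exact Or.inl (List.mem_append_right _ hxn)
      · rw [if_neg hclt]
        refine pvExit_cap board dim start v c hvn (by simp at hlen; omega) hc2 (by omega) hreach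

theorem pvDfs_eq (board : List (Int × Int)) (dim : Int) (start : Int × Int) :
    ∀ (fuel : Nat) (cell : Int × Int) (v : PySem.Set (Int × Int)) (c : Int),
    v.Nodup → cell ∈ v → c + 1 = (v.length : Int) → 0 ≤ c → c < 200 →
    (200 : Int) ≤ c + fuel →
    (∀ x ∈ v, x ∈ pvReach board dim start c.toNat) →
    (pvDfs board dim fuel cell v c).1.Nodup ∧
    (∀ x ∈ v, x ∈ (pvDfs board dim fuel cell v c).1) ∧
    (pvDfs board dim fuel cell v c).2 = ((pvDfs board dim fuel cell v c).1.length : Int) ∧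
    c + 1 ≤ (pvDfs board dim fuel cell v c).2 ∧ (pvDfs board dim fuel cell v c).2 ≤ 200 ∧
    (∀ x ∈ (pvDfs board dim fuel cell v c).1,
      x ∈ pvReach board dim start ((pvDfs board dim fuel cell v c).2 - 1).toNat) ∧
    ((pvDfs board dim fuel cell v c).2 < 200 →
      (∀ y ∈ pvNbrs board dim cell, y ∈ (pvDfs board dim fuel cell v c).1) ∧
      (∀ x ∈ (pvDfs board dim fuel cell v c).1, x ∉ v →
        ∀ y ∈ pvNbrs board dim x, y ∈ (pvDfs board dim fuel cell v c).1)) := by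
  intro fuel
  induction fuel with
  | zero =>
    intro cell v c _ _ _ _ hc200 hfuel _
    exfalso
    simp at hfuel
    omega
  | succ fuel IHf =>
    intro cell v c hvn hcell hlen hc0 hc200 hfuel hreach
    have H : ∀ (l : List (Int × Int)) (vc : PySem.Set (Int × Int)) (cc : Int),
        vc.Nodup → (∀ x ∈ v, x ∈ vc) → cell ∈ vc → cc = (vc.length : Int) →
        c + 1 ≤ cc → cc ≤ 200 →
        (∀ x ∈ vc, x ∈ pvReach board dim start (cc - 1).toNat) →
        (cc < 200 → ∀ x ∈ vc, x ∉ v → ∀ y ∈ pvNbrs board dim x, y ∈ vc) →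
        (∀ d0 ∈ l, d0 ∈ pvDirs) →
        ∀ r : PySem.Set (Int × Int) × Int,
        l.foldl (fun (st : PySem.Set (Int × Int) × Int) d =>
            if pvOk board dim (cell.1 + d.1, cell.2 + d.2) &&
               !(PySem.Set.contains st.1 (cell.1 + d.1, cell.2 + d.2)) &&
               decide (st.2 < 200) then
              pvDfs board dim fuel (cell.1 + d.1, cell.2 + d.2)
                (PySem.Set.add st.1 (cell.1 + d.1, cell.2 + d.2)) st.2
            else st) (vc, cc) = r →
        r.1.Nodup ∧ (∀ x ∈ vc, x ∈ r.1) ∧ r.2 = (r.1.length : Int) ∧ cc ≤ r.2 ∧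
        r.2 ≤ 200 ∧ (∀ x ∈ r.1, x ∈ pvReach board dim start (r.2 - 1).toNat) ∧
        (r.2 < 200 →
          (∀ d0 ∈ l, pvOk board dim (cell.1 + d0.1, cell.2 + d0.2) = true →
            (cell.1 + d0.1, cell.2 + d0.2) ∈ r.1) ∧
          (∀ x ∈ r.1, x ∉ v → ∀ y ∈ pvNbrs board dim x, y ∈ r.1)) := by
      intro l
      induction l with
      | nil =>
        intro vc cc h1 h2 h3 h4 h5 h6 h7 h8 _ r hr
        rw [List.foldl_nil] at hr
        subst hr
        exact ⟨h1, fun x hx => hx, h4, le_refl _, h6, h7,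
          fun hlt => ⟨by simp, h8 hlt⟩⟩
      | cons d l IHl =>
        intro vc cc h1 h2 h3 h4 h5 h6 h7 h8 h9 r hr
        rw [List.foldl_cons] at hr
        by_cases hcond : (pvOk board dim (cell.1 + d.1, cell.2 + d.2) &&
            !(PySem.Set.contains vc (cell.1 + d.1, cell.2 + d.2)) &&
            decide (cc < 200)) = true
        · rw [if_pos hcond] at hr
          have hcond' := hcond
          simp only [Bool.and_eq_true, decide_eq_true_eq] at hcond'
          obtain ⟨⟨hok, hnm⟩, hlt⟩ := hcond'
          have hnmem : (cell.1 + d.1, cell.2 + d.2) ∉ vc := pvNotContains.1 hnm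
          rw [PySem.Set.add_of_not_mem hnmem] at hr
          have hccpos : (0:Int) ≤ cc := by omega
          have htn : (cc - 1).toNat + 1 = cc.toNat := by omega
          have hchild := IHf (cell.1 + d.1, cell.2 + d.2)
            (vc ++ [(cell.1 + d.1, cell.2 + d.2)]) cc
            (by
              simp [List.nodup_append, h1]
              intro a b hab ha hb
              subst ha; subst hb; exact hnmem hab)
            (List.mem_append_right _ (List.mem_singleton.2 rfl))
            (by simp only [List.length_append, List.length_singleton]; push_cast; omega)
            hccpos hlt
            (by push_cast at hfuel ⊢; omega)
            (by
              intro x hx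
              rcases List.mem_append.1 hx with hx | hx
              · exact pvReach_mono board dim start (by omega) (h7 x hx)
              · rw [List.mem_singleton] at hx
                subst hx
                have hxn : (cell.1 + d.1, cell.2 + d.2) ∈ pvNbrs board dim cell :=
                  (mem_pvNbrs board dim cell _).2 ⟨⟨d, h9 d List.mem_cons_self, rfl⟩, hok⟩
                have hstep := pvNbrs_subset_step board dim (h7 cell h3) hxn
                rw [← pvReach_succ] at hstep
                rwa [htn] at hstep)
          set rc := pvDfs board dim fuel (cell.1 + d.1, cell.2 + d.2)
            (vc ++ [(cell.1 + d.1, cell.2 + d.2)]) cc with hrc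
          obtain ⟨cnd, csub, clen, cge, cle, creach, cclosed⟩ := hchild
          have hvcsub : ∀ x ∈ vc, x ∈ rc.1 :=
            fun x hx => csub x (List.mem_append_left _ hx)
          have hnin : (cell.1 + d.1, cell.2 + d.2) ∈ rc.1 :=
            csub _ (List.mem_append_right _ (List.mem_singleton.2 rfl))
          obtain ⟨n1, n2, n3, n4, n5, n6, n7⟩ := IHl rc.1 rc.2 cnd
            (fun x hx => hvcsub x (h2 x hx))
            (hvcsub cell h3) clen (by omega) cle creach
            (by
              intro hlt2 x hx hxnv
              by_cases hx2 : x ∈ vc ++ [(cell.1 + d.1, cell.2 + d.2)]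
              · rcases List.mem_append.1 hx2 with hxvc | hxn
                · exact fun y hy => hvcsub y (h8 hlt x hxvc hxnv y hy)
                · rw [List.mem_singleton] at hxn
                  subst hxn
                  exact (cclosed hlt2).1
              · exact (cclosed hlt2).2 x hx hx2)
            (fun d0 h => h9 d0 (List.mem_cons_of_mem _ h))
            r (by rwa [Prod.mk.eta])
          refine ⟨n1, fun x hx => n2 x (hvcsub x hx), n3, by omega, n5, n6, ?_⟩
          intro hlt2
          refine ⟨?_, (n7 hlt2).2⟩
          intro d0 hd0 hok0
          rcases List.mem_cons.1 hd0 with rfl | hd0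
          · exact n2 _ hnin
          · exact (n7 hlt2).1 d0 hd0 hok0
        · rw [if_neg hcond] at hr
          obtain ⟨n1, n2, n3, n4, n5, n6, n7⟩ := IHl vc cc h1 h2 h3 h4 h5 h6 h7 h8
            (fun d0 h => h9 d0 (List.mem_cons_of_mem _ h)) r hr
          refine ⟨n1, n2, n3, n4, n5, n6, ?_⟩
          intro hlt2
          refine ⟨?_, (n7 hlt2).2⟩
          intro d0 hd0 hok0
          rcases List.mem_cons.1 hd0 with rfl | hd0
          · have hcc : cc < 200 := lt_of_le_of_lt n4 hlt2
            simp only [Bool.and_eq_true, decide_eq_true_eq] at hcond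
            have hct : ¬((!(PySem.Set.contains vc (cell.1 + d0.1, cell.2 + d0.2))) = true) :=
              fun hnm => hcond ⟨⟨hok0, hnm⟩, hcc⟩
            have hmem : (cell.1 + d0.1, cell.2 + d0.2) ∈ vc := by
              by_contra hn
              exact hct (pvNotContains.2 hn)
            exact n2 _ hmem
          · exact (n7 hlt2).1 d0 hd0 hok0
    have hc1 : c + 1 - 1 = c := by omega
    obtain ⟨n1, n2, n3, n4, n5, n6, n7⟩ := H pvDirs v (c + 1) hvn (fun x hx => hx) hcell
      hlen (le_refl _) (by omega)
      (by rw [hc1]; exact hreach)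
      (fun _ x hxv hxnv => absurd hxv hxnv)
      (fun d0 h => h)
      (pvDfs board dim (fuel + 1) cell v c) (by simp only [pvDfs])
    refine ⟨n1, n2, n3, n4, n5, n6, ?_⟩
    intro hlt2
    refine ⟨?_, (n7 hlt2).2⟩
    intro y hy
    obtain ⟨⟨d, hd, hye⟩, hok⟩ := (mem_pvNbrs board dim cell y).1 hy
    subst hye
    exact (n7 hlt2).1 d hd hok

-- ===== VERDICT (by name: the statement is the Claim_ definition above) =====
theorem get_reachable_space_spec : Claim_equal_get_reachable_space := by
  intro start board dim _
  unfold Spec_get_reachable_space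
  have hset : PySem.Set.ofList [start] = [start] :=
    PySem.Set.ofList_eq_self_of_nodup _ (List.nodup_singleton _)
  have h0 : ∀ x ∈ ([start] : List (Int × Int)), x ∈ pvReach board dim start (0 : Int).toNat := by
    intro x hx
    rw [List.mem_singleton] at hx
    subst hx
    simp [pvReach]
  have hA : get_reachable_space start board dim =
      ((min 200 (pvReach board dim start 200).card : Nat) : Int) := by
    unfold get_reachable_space
    rw [hset]
    exact pvBfs_eq board dim start 200 [start] [start] 0
      (List.nodup_singleton _) (List.nodup_singleton _) (fun x hx => hx)
      (by simp) (le_refl _) (by norm_num) (by norm_num)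
      h0 (List.mem_singleton.2 rfl) (fun x hx => Or.inl hx)
  obtain ⟨bn1, bn2, bn3, bn4, bn5, bn6, bn7⟩ := pvDfs_eq board dim start 200 start [start] 0
    (List.nodup_singleton _) (List.mem_singleton.2 rfl) (by simp) (le_refl _)
    (by norm_num) (by norm_num) h0
  have hreach' : ∀ x ∈ (pvDfs board dim 200 start [start] 0).1,
      x ∈ pvReach board dim start (pvDfs board dim 200 start [start] 0).2.toNat :=
    fun x hx => pvReach_mono board dim start (by omega) (bn6 x hx)
  have hB : get_reachable_space_alt start board dim =
      ((min 200 (pvReach board dim start 200).card : Nat) : Int) := by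
    unfold get_reachable_space_alt
    rw [hset]
    by_cases hlt : (pvDfs board dim 200 start [start] 0).2 < 200
    · have hcl : ∀ x ∈ (pvDfs board dim 200 start [start] 0).1,
          ∀ y ∈ pvNbrs board dim x, y ∈ (pvDfs board dim 200 start [start] 0).1 := by
        intro x hx y hy
        by_cases hxs : x ∈ ([start] : List (Int × Int))
        · rw [List.mem_singleton] at hxs
          subst hxs
          exact (bn7 hlt).1 y hy
        · exact (bn7 hlt).2 x hx hxs y hy
      exact pvExit_closed board dim start _ _ bn1 bn3 (by omega) bn5 hreach'
        (bn2 start (List.mem_singleton.2 rfl)) hcl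
    · exact pvExit_cap board dim start _ _ bn1 (le_of_eq bn3) bn5 (by omega) hreach'
  rw [hA, hB]
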